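-- pv_equiv track=rewrite | github.com/HenryTrin/N-gram-Sentence-Generator | Chatterbot.py | trigramDictionary
-- ===== SOURCE A (Python) =====
-- def trigramDictionary(text):
--     trigramDict = {}
--     # Since we are looking at every 3 words. We need to minus the length by one otherwise a index error
--     length = len(text) - 2
--
--     # Runs through the whole text and insert into the dictionary with a key and value
--     for i in range(length):
--         key = text[i] + " " + text[i + 1]
--         value = text[i + 1] + " " + text[i + 2]
--         # This is here to remove any empty space entry that might occur
--         if (value == ""):
--             continue
--
--         # Needed a way to have new keys coming in
--         # Used: https://www.w3schools.com/python/ref_dictionary_setdefault.asp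
--         trigramDict.setdefault(key, []).append(value)
--     return trigramDict
-- ===== SOURCE B (Python) =====
-- def trigramDictionary(text):
--     # Group-by formulation: zip out the trigrams, then build the dict per distinct key.
--     kvs = [(a + " " + b, b + " " + c) for a, b, c in zip(text, text[1:], text[2:])]
--     keys = list(dict.fromkeys(k for k, _ in kvs))
--     return {k: [v for k2, v in kvs if k2 == k] for k in keys}
-- ===== Notes on version B (the rewrite author's own statement) =====
-- stated objective: alternative
-- what changed: B replaces A's single index-loop that mutates a dict via setdefault/append with a group-by formulation: zip out the (key,value) trigram pairs, dedup the keys in first-occurrence order, and build each key's value list by a per-key scan of the pair list; the dead value=='' branch disappears.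
import Mathlib
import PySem

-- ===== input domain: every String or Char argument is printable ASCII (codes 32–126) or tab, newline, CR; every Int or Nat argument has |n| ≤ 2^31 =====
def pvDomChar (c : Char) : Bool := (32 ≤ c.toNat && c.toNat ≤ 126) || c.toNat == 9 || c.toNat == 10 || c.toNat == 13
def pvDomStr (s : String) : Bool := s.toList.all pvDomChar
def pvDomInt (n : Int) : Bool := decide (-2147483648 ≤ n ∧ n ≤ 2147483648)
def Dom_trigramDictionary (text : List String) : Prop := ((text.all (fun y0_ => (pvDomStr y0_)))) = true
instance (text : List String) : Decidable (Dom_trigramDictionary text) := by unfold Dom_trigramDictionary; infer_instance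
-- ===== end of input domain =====

-- B is a group-by reformulation (zip trigrams, dedup keys, per-key gather) — alternative decomposition, not claimed faster.

-- ===== PORT A =====
def trigramDictionary (text : List String) : List (String × List String) :=
  let length : Int := (text.length : Int) - 2
  ((PySem.List.pyRange 0 length 1).foldl
    (fun (d : PySem.Dict String (List String)) i =>
      let key := PySem.List.pyGetD text i "" ++ " " ++ PySem.List.pyGetD text (i + 1) ""
      let value := PySem.List.pyGetD text (i + 1) "" ++ " " ++ PySem.List.pyGetD text (i + 2) ""
      if value == "" then d
      else d.modify key [] (fun l => l ++ [value]))
    PySem.Dict.empty).items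

-- ===== PORT B =====
def trigramDictionary_alt (text : List String) : List (String × List String) :=
  let kvs : List (String × String) :=
    ((text.zip (PySem.List.slice text (some 1) none)).zip (PySem.List.slice text (some 2) none)).map
      (fun p => (p.1.1 ++ " " ++ p.1.2, p.1.2 ++ " " ++ p.2))
  let keys := PySem.List.dedup (kvs.map (fun p => p.1))
  keys.map (fun k => (k, (kvs.filter (fun p => p.1 == k)).map (fun p => p.2)))

-- ===== PRECONDITION & SPEC =====
def Spec_trigramDictionary (text : List String) (out : List (String × List String)) : Prop := out = trigramDictionary_alt text
instance (text : List String) (out : List (String × List String)) : Decidable (Spec_trigramDictionary text out) := by unfold Spec_trigramDictionary; infer_instance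

-- ===== CLAIM =====
def Claim_equal_trigramDictionary : Prop := ∀ (text : List String), Dom_trigramDictionary text → Spec_trigramDictionary text (trigramDictionary text)

-- ===== LEMMAS AND PROOFS =====

-- a word pair always contains a space, so A's empty-value guard never fires
theorem pvPair_ne_empty (a b : String) : ((a ++ " " ++ b) == "") = false := by
  rw [beq_eq_false_iff_ne]
  intro h
  have := congrArg String.length h
  simp [String.length_append] at this

-- A's index loop produces exactly B's zipped trigram pair list (slices already reduced to drops)
theorem pvKvs_eq (text : List String) :
    (PySem.List.pyRange 0 ((text.length : Int) - 2) 1).map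
      (fun i => (PySem.List.pyGetD text i "" ++ " " ++ PySem.List.pyGetD text (i + 1) "",
                 PySem.List.pyGetD text (i + 1) "" ++ " " ++ PySem.List.pyGetD text (i + 2) ""))
    = ((text.zip (text.drop 1)).zip (text.drop 2)).map
        (fun p => (p.1.1 ++ " " ++ p.1.2, p.1.2 ++ " " ++ p.2)) := by
  apply List.ext_getElem
  · simp [PySem.List.length_pyRange_one]
    omega
  · intro k h1 h2
    have hk : k < text.length - 2 := by
      simp [PySem.List.length_pyRange_one] at h1; omega
    simp [PySem.List.getElem_pyRange_one]
    have hk0 : k < text.length := by omega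
    have hk1 : k + 1 < text.length := by omega
    have hk2 : k + 2 < text.length := by omega
    have e1 : PySem.List.pyGetD text ((k : Int) + 1) "" = text[k + 1] := by
      rw [show ((k : Int) + 1) = ((k + 1 : Nat) : Int) by push_cast; ring,
          PySem.List.pyGetD_natCast, List.getD_eq_getElem _ _ hk1]
    have e2 : PySem.List.pyGetD text ((k : Int) + 2) "" = text[k + 2] := by
      rw [show ((k : Int) + 2) = ((k + 2 : Nat) : Int) by push_cast; ring,
          PySem.List.pyGetD_natCast, List.getD_eq_getElem _ _ hk2]
    have e3 : text[2 + k]'(by omega) = text[k + 2] := by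
      congr 1
      omega
    rw [e1, e2, e3]
    simp [List.getElem?_eq_getElem hk0]

-- grouping a kv list through a modify/append fold yields the dedup-keys/per-key-filter table
theorem pvGroup (kvs : List (String × String)) :
    (kvs.foldl (fun (d : PySem.Dict String (List String)) p =>
        d.modify p.1 [] (fun l => l ++ [p.2])) PySem.Dict.empty).items
    = (PySem.List.dedup (kvs.map (fun p => p.1))).map
        (fun k => (k, (kvs.filter (fun p => p.1 == k)).map (fun p => p.2))) := by
  have hnodup : (kvs.foldl (fun (d : PySem.Dict String (List String)) p =>
      d.modify p.1 [] (fun l => l ++ [p.2])) PySem.Dict.empty).keys.Nodup :=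
    PySem.Dict.nodup_keys_foldl_modify_key kvs (fun p => p.1) []
      (fun d p => fun l => l ++ [p.2]) PySem.Dict.empty PySem.Dict.nodup_keys_empty
  rw [PySem.Dict.items_eq_map_keys _ hnodup [], PySem.Dict.keys_foldl_modify_key]
  simp only [PySem.Dict.keys_empty, PySem.Set.update_nil_left, PySem.List.dedup_eq_ofList]
  apply List.map_congr_left
  intro k _
  congr 1
  rw [PySem.Dict.getD_foldl_modify_append]
  simp

theorem trigramDictionary_eq (text : List String) :
    trigramDictionary text = trigramDictionary_alt text := by
  unfold trigramDictionary trigramDictionary_alt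
  simp only
  have h1 : PySem.List.slice text (some 1) none = text.drop 1 := by
    simpa using PySem.List.slice_from_natCast text 1
  have h2 : PySem.List.slice text (some 2) none = text.drop 2 := by
    simpa using PySem.List.slice_from_natCast text 2
  have hA : (PySem.List.pyRange 0 ((text.length : Int) - 2) 1).foldl
      (fun (d : PySem.Dict String (List String)) i =>
        let key := PySem.List.pyGetD text i "" ++ " " ++ PySem.List.pyGetD text (i + 1) ""
        let value := PySem.List.pyGetD text (i + 1) "" ++ " " ++ PySem.List.pyGetD text (i + 2) ""
        if value == "" then d else d.modify key [] (fun l => l ++ [value]))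
      PySem.Dict.empty
      = (((text.zip (text.drop 1)).zip (text.drop 2)).map
          (fun p => (p.1.1 ++ " " ++ p.1.2, p.1.2 ++ " " ++ p.2))).foldl
          (fun d p => d.modify p.1 [] (fun l => l ++ [p.2])) PySem.Dict.empty := by
    rw [← pvKvs_eq, List.foldl_map]
    apply PySem.List.foldl_congr_mem
    intro acc i _
    simp only [pvPair_ne_empty]
    simp
  rw [h1, h2, hA, pvGroup]

-- ===== VERDICT =====
theorem trigramDictionary_spec : Claim_equal_trigramDictionary := by
  intro text _
  unfold Spec_trigramDictionary
  exact trigramDictionary_eq text
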